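-- pv_equiv track=rewrite | github.com/DARPA-CRITICALMAAS/sri-ta2-mappable-criteria | polygon_ranking/pull_TA1_polygons.py | find_largest_indices
-- ===== SOURCE A (Python) =====
-- def find_largest_indices(A, B):
--     indices = []
--
--     for a in A:
--         if a in B:
--             indices.append(B.index(a))
--
--     if indices:
--         return max(indices)
--     else:
--         return None  # Return None if none of the elements of A are in B
-- ===== SOURCE B (Python) =====
-- def find_largest_indices(A, B):
--     setA = set(A)
--     seen = set()
--     best = None
--     for i, b in enumerate(B):
--         if b not in seen:
--             seen.add(b)
--             if b in setA:
--                 best = i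
--     return best
-- ===== Notes on version B (the rewrite author's own statement) =====
-- stated objective: faster
-- what changed: Replaces the per-element 'a in B' + B.index scans over A with one forward pass over enumerate(B) driven by a seen-set (first occurrences) and set(A) membership, keeping the running best index.
import Mathlib
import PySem

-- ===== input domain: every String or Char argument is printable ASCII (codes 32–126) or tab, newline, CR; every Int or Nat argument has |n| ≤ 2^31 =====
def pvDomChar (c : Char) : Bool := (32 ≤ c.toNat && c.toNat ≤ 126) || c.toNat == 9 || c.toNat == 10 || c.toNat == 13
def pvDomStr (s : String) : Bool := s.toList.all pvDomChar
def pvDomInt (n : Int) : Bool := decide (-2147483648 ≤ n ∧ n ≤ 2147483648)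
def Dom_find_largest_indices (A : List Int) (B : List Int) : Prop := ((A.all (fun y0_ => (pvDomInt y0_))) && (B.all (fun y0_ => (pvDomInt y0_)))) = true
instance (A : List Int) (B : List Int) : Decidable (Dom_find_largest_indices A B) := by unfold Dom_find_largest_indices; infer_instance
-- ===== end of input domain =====

-- B replaces A's per-element `a in B` + `B.index(a)` scans with one pass over enumerate(B)
-- using a seen-set and set(A); objective: faster.

-- ===== PORT A =====
def find_largest_indices (A : List Int) (B : List Int) : Option Int :=
  let indices := A.foldl (fun acc a =>
    if B.contains a then acc ++ [(((PySem.List.index? B a).getD 0 : Nat) : Int)] else acc) []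
  if !indices.isEmpty then
    PySem.List.max? indices (fun x => x)
  else
    none

-- ===== PORT B =====
-- loop body of Source B: `if b not in seen: seen.add(b); if b in setA: best = i`
def altStep (setA : PySem.Set Int) (st : PySem.Set Int × Option Int) (ib : Int × Int) :
    PySem.Set Int × Option Int :=
  if PySem.Set.contains st.1 ib.2 then st
  else
    let seen := PySem.Set.add st.1 ib.2
    if PySem.Set.contains setA ib.2 then (seen, some ib.1) else (seen, st.2)

def find_largest_indices_alt (A : List Int) (B : List Int) : Option Int :=
  let setA := PySem.Set.ofList A
  ((PySem.List.enumerate B).foldl (altStep setA) (PySem.Set.empty, none)).2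

-- ===== PRECONDITION & SPEC =====
def Spec_find_largest_indices (A : List Int) (B : List Int) (out : Option Int) : Prop := out = find_largest_indices_alt A B
instance (A : List Int) (B : List Int) (out : Option Int) : Decidable (Spec_find_largest_indices A B out) := by unfold Spec_find_largest_indices; infer_instance

-- ===== CLAIM (what is proved, stated in full; the proofs are below) =====
def Claim_equal_find_largest_indices : Prop := ∀ (A : List Int) (B : List Int), Dom_find_largest_indices A B → Spec_find_largest_indices A B (find_largest_indices A B)

-- ===== LEMMAS AND PROOFS =====

-- the value A appends for a: B.index(a), as an Int
def idxI (B : List Int) (a : Int) : Int := (((PySem.List.index? B a).getD 0 : Nat) : Int)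

lemma idxI_append_of_mem (B : List Int) (t : List Int) (a : Int) (h : a ∈ B) :
    idxI (B ++ t) a = idxI B a := by
  unfold idxI
  rw [PySem.List.index?_append_of_mem t h]

lemma idxI_append_self (B : List Int) (x : Int) (h : x ∉ B) :
    idxI (B ++ [x]) x = (B.length : Int) := by
  unfold idxI
  rw [PySem.List.index?_append_singleton_self B x h]
  simp

lemma idxI_lt_length (B : List Int) (a : Int) (h : a ∈ B) : idxI B a < (B.length : Int) := by
  obtain ⟨k, hk⟩ := Option.isSome_iff_exists.1 ((PySem.List.index?_isSome_iff B a).2 h)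
  obtain ⟨hlt, -, -⟩ := PySem.List.getElem_of_index?_eq_some hk
  unfold idxI
  rw [hk]
  exact_mod_cast hlt

-- invariant of B's single pass over enumerate(B)
lemma loop_inv (A : List Int) (B : List Int) :
    ((PySem.List.enumerate B).foldl (altStep (PySem.Set.ofList A)) (PySem.Set.empty, none)).1
      = PySem.Set.ofList B ∧
    (((PySem.List.enumerate B).foldl (altStep (PySem.Set.ofList A)) (PySem.Set.empty, none)).2 = none
      ↔ ∀ a ∈ A, a ∉ B) ∧
    (∀ m, ((PySem.List.enumerate B).foldl (altStep (PySem.Set.ofList A)) (PySem.Set.empty, none)).2 = some m →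
      (∃ a, a ∈ A ∧ a ∈ B ∧ m = idxI B a) ∧ ∀ a, a ∈ A → a ∈ B → idxI B a ≤ m) := by
  induction B using List.reverseRecOn with
  | nil =>
      refine ⟨by simp [PySem.List.enumerate_nil, PySem.Set.ofList_eq_foldl, PySem.Set.empty], ?_, ?_⟩
      · simp [PySem.List.enumerate_nil]
      · intro m hm
        simp [PySem.List.enumerate_nil] at hm
  | append_singleton B x ih =>
      obtain ⟨h1, h2, h3⟩ := ih
      have henum : PySem.List.enumerate (B ++ [x])
          = PySem.List.enumerate B ++ [((B.length : Int), x)] := by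
        simp [PySem.List.enumerate_append, PySem.List.enumerate_cons, PySem.List.enumerate_nil]
      have hofl : PySem.Set.ofList (B ++ [x]) = (PySem.Set.ofList B).add x := by
        simp [PySem.Set.ofList_eq_foldl, List.foldl_append]
      rw [henum, List.foldl_append, List.foldl_cons, List.foldl_nil]
      set st := (PySem.List.enumerate B).foldl (altStep (PySem.Set.ofList A)) (PySem.Set.empty, none) with hst
      by_cases hxB : x ∈ B
      · -- duplicate: already seen, state unchanged
        have hx1 : x ∈ st.1 := by rw [h1]; exact (PySem.Set.mem_ofList B x).2 hxB
        have hstep : altStep (PySem.Set.ofList A) st ((B.length : Int), x) = st := by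
          simp [altStep, hx1]
        have hofl2 : PySem.Set.ofList (B ++ [x]) = PySem.Set.ofList B := by
          rw [hofl]; simp [PySem.Set.add, PySem.Set.mem_ofList, hxB]
        refine ⟨by rw [hstep, h1, hofl2], ?_, ?_⟩
        · rw [hstep, h2]
          constructor
          · intro h a ha hb
            rcases List.mem_append.1 hb with hb | hb
            · exact h a ha hb
            · exact h a ha ((List.mem_singleton.1 hb) ▸ hxB)
          · intro h a ha hb
            exact h a ha (List.mem_append_left _ hb)
        · rw [hstep]
          intro m hm
          obtain ⟨⟨a, haA, haB, hval⟩, hmax⟩ := h3 m hm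
          refine ⟨⟨a, haA, List.mem_append_left _ haB, by rw [idxI_append_of_mem _ _ _ haB]; exact hval⟩, ?_⟩
          intro a' ha'A ha'B
          have ha'B' : a' ∈ B := by
            rcases List.mem_append.1 ha'B with h | h
            · exact h
            · exact (List.mem_singleton.1 h) ▸ hxB
          rw [idxI_append_of_mem _ _ _ ha'B']
          exact hmax a' ha'A ha'B'
      · have hx1 : x ∉ st.1 := by rw [h1]; simpa [PySem.Set.mem_ofList] using hxB
        by_cases hxA : x ∈ A
        · -- new element of B that is in A: best becomes its index
          have hstep : altStep (PySem.Set.ofList A) st ((B.length : Int), x)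
              = (st.1.add x, some (B.length : Int)) := by
            simp [altStep, hx1, PySem.Set.mem_ofList, hxA]
          refine ⟨by rw [hstep, h1, ← hofl], ?_, ?_⟩
          · rw [hstep]
            constructor
            · intro h
              exact absurd h (by simp)
            · intro h
              exact ((h x hxA) (List.mem_append_right B (List.mem_singleton.2 rfl))).elim
          · rw [hstep]
            intro m hm
            have hm' : ((B.length : Int)) = m := Option.some.inj hm
            subst hm'
            refine ⟨⟨x, hxA, List.mem_append_right _ (List.mem_singleton.2 rfl), (idxI_append_self B x hxB).symm⟩, ?_⟩
            intro a haA haB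
            rcases List.mem_append.1 haB with h | h
            · rw [idxI_append_of_mem _ _ _ h]
              exact le_of_lt (idxI_lt_length B a h)
            · rw [List.mem_singleton.1 h, idxI_append_self B x hxB]
        · -- new element of B not in A: best unchanged
          have hstep : altStep (PySem.Set.ofList A) st ((B.length : Int), x)
              = (st.1.add x, st.2) := by
            simp [altStep, hx1, PySem.Set.mem_ofList, hxA]
          refine ⟨by rw [hstep, h1, ← hofl], ?_, ?_⟩
          · rw [hstep]
            show st.2 = none ↔ _
            rw [h2]
            constructor
            · intro h a ha hb
              rcases List.mem_append.1 hb with hb | hb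
              · exact h a ha hb
              · exact hxA ((List.mem_singleton.1 hb) ▸ ha)
            · intro h a ha hb
              exact h a ha (List.mem_append_left _ hb)
          · rw [hstep]
            intro m hm
            obtain ⟨⟨a, haA, haB, hval⟩, hmax⟩ := h3 m hm
            refine ⟨⟨a, haA, List.mem_append_left _ haB, by rw [idxI_append_of_mem _ _ _ haB]; exact hval⟩, ?_⟩
            intro a' ha'A ha'B
            have ha'B' : a' ∈ B := by
              rcases List.mem_append.1 ha'B with h | h
              · exact h
              · exact absurd ((List.mem_singleton.1 h) ▸ ha'A) hxA
            rw [idxI_append_of_mem _ _ _ ha'B']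
            exact hmax a' ha'A ha'B'

lemma indices_eq (A B : List Int) :
    A.foldl (fun acc a =>
      if B.contains a then acc ++ [(((PySem.List.index? B a).getD 0 : Nat) : Int)] else acc) []
    = (A.filter (fun a => B.contains a)).map (idxI B) := by
  simpa [idxI] using
    PySem.List.foldl_append_if (p := fun a => B.contains a) (f := idxI B) (l := A) (acc := ([] : List Int))

-- ===== VERDICT (by name: the statement is the Claim_ definition above) =====
theorem find_largest_indices_spec : Claim_equal_find_largest_indices := by
  intro A B _
  unfold Spec_find_largest_indices find_largest_indices find_largest_indices_alt
  dsimp only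
  obtain ⟨-, h2, h3⟩ := loop_inv A B
  rw [indices_eq]
  set L := (A.filter (fun a => B.contains a)).map (idxI B) with hL
  have memL : ∀ y, y ∈ L ↔ ∃ a, a ∈ A ∧ a ∈ B ∧ y = idxI B a := by
    intro y
    constructor
    · intro hy
      obtain ⟨a, ha, hv⟩ := List.mem_map.1 hy
      obtain ⟨haA, haB⟩ := List.mem_filter.1 ha
      exact ⟨a, haA, by simpa using haB, hv.symm⟩
    · rintro ⟨a, haA, haB, hv⟩
      exact hv ▸ List.mem_map.2 ⟨a, List.mem_filter.2 ⟨haA, by simpa using haB⟩, rfl⟩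
  by_cases hLe : L = []
  · have hdisj : ∀ a ∈ A, a ∉ B := by
      intro a haA haB
      have : idxI B a ∈ L := (memL _).2 ⟨a, haA, haB, rfl⟩
      simp [hLe] at this
    rw [if_neg (by simp [hLe])]
    exact (h2.2 hdisj).symm
  · rw [if_pos (by simp [hLe])]
    cases hr : ((PySem.List.enumerate B).foldl (altStep (PySem.Set.ofList A)) (PySem.Set.empty, none)).2 with
    | none =>
        exfalso
        obtain ⟨y, hy⟩ := List.exists_mem_of_ne_nil L hLe
        obtain ⟨a, haA, haB, -⟩ := (memL y).1 hy
        exact (h2.1 hr a haA) haB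
    | some m =>
        obtain ⟨⟨a, haA, haB, hval⟩, hmax⟩ := h3 m hr
        have hmem : m ∈ L := (memL m).2 ⟨a, haA, haB, hval⟩
        cases hM : PySem.List.max? L (fun x => x) with
        | none => exact absurd ((PySem.List.max?_eq_none_iff L _).1 hM) hLe
        | some m' =>
            have hm'mem : m' ∈ L := PySem.List.max?_mem hM
            have hle1 : m ≤ m' := PySem.List.max?_isMax hM m hmem
            obtain ⟨a', ha'A, ha'B, hv'⟩ := (memL m').1 hm'mem
            have hle2 : m' ≤ m := hv' ▸ hmax a' ha'A ha'B
            exact congrArg some (le_antisymm hle2 hle1)
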